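-- pv_equiv track=rewrite | github.com/kmus1232/Algorithm | python/boj_23354.py | make_routes
-- ===== SOURCE A (Python) =====
-- def make_routes(targets, home):
--     routes = []
--     def f(route, targets, home):
--         if not route:
--             route.append(home)
--             f(route, targets, home)
--         elif not targets:
--             routes.append(route + [home])
--         else:
--             for i in range(len(targets)):
--                 f(route + [targets[i]], targets[:i] + targets[i+1:], home)
--
--     f([], targets, home)
--     return routes
-- ===== SOURCE B (Python) =====
-- from itertools import permutations
--
-- def make_routes(targets, home):
--     return [[home] + list(p) + [home] for p in permutations(targets)]
-- ===== Notes on version B (the rewrite author's own statement) =====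
-- stated objective: idiomatic
-- what changed: Replaces the nested mutating recursion with a single comprehension over itertools.permutations, which yields orderings in the same index-selection order.
import Mathlib
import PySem

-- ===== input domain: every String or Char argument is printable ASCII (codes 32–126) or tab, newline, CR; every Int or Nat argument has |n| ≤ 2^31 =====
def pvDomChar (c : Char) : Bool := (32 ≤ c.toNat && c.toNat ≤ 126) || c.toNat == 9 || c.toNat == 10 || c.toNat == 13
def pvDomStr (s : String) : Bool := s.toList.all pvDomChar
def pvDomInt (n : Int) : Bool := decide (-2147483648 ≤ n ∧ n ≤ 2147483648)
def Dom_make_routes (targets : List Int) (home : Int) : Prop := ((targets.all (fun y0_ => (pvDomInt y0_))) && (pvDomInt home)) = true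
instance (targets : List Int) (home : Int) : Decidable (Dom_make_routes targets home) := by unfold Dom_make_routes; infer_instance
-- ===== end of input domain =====

-- B's comprehension over itertools.permutations replaces A's nested mutating recursion; same order, same cost (objective: idiomatic).

-- ===== PORT A =====
-- needed by the ports' termination proofs
theorem pv_slice_rm_length (targets : List Int) (i : Nat) (h : i < targets.length) :
    (PySem.List.slice targets none (some (i : Int)) ++ PySem.List.slice targets (some ((i : Int)+1)) none).length < targets.length := by
  rw [PySem.List.slice_to_natCast]
  have hc : ((i : Int) + 1) = ((i + 1 : Nat) : Int) := by push_cast; ring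
  rw [hc, PySem.List.slice_from_natCast]
  simp
  omega

-- literal transliteration of the inner recursive f (routes accumulator threaded
-- explicitly; the for-loop over range(len(targets)) is the counter recursion loopA)
mutual
def make_routes_f (route : List Int) (targets : List Int) (home : Int) : List (List Int) :=
  if route = [] then make_routes_f (route ++ [home]) targets home
  else if targets = [] then [route ++ [home]]
  else make_routes_loop route targets home 0 []
termination_by (targets.length, if route = [] then 3 else 2, 0)
decreasing_by
  · simp_all [Prod.lex_def]
  · simp_all [Prod.lex_def]

def make_routes_loop (route : List Int) (targets : List Int) (home : Int) (i : Nat) (acc : List (List Int)) : List (List Int) :=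
  if i < targets.length then
    make_routes_loop route targets home (i+1)
      (acc ++ make_routes_f (route ++ [PySem.List.pyGetD targets (i : Int) 0])
        (PySem.List.slice targets none (some (i : Int)) ++ PySem.List.slice targets (some ((i : Int)+1)) none) home)
  else acc
termination_by (targets.length, 1, targets.length - i)
decreasing_by
  · have h2 := pv_slice_rm_length targets i (by omega)
    simp_all [Prod.lex_def]
  · simp_all [Prod.lex_def]
    omega
end

def make_routes (targets : List Int) (home : Int) : List (List Int) :=
  make_routes_f [] targets home

-- ===== PORT B =====
-- hand port of itertools.permutations in its documented order:
-- picks lists every (chosen element, remaining elements) pair in index order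
def picks : List Int → List (Int × List Int)
  | [] => []
  | x :: xs => (x, xs) :: (picks xs).map (fun p => (p.1, x :: p.2))

theorem picks_length {xs : List Int} {p : Int × List Int} (h : p ∈ picks xs) :
    p.2.length + 1 = xs.length := by
  induction xs generalizing p with
  | nil => simp [picks] at h
  | cons x xs ih =>
    simp [picks] at h
    rcases h with h | ⟨q, r, hqr, h⟩
    · subst h; simp
    · subst h; simp; have := ih hqr; simpa using this

def perms (xs : List Int) : List (List Int) :=
  if xs = [] then [[]]
  else (picks xs).attach.flatMap (fun p => (perms p.1.2).map (p.1.1 :: ·))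
termination_by xs.length
decreasing_by
  have := picks_length p.2
  omega

def make_routes_alt (targets : List Int) (home : Int) : List (List Int) :=
  (perms targets).map (fun p => home :: p ++ [home])

-- ===== PRECONDITION & SPEC =====
def Spec_make_routes (targets : List Int) (home : Int) (out : List (List Int)) : Prop := out = make_routes_alt targets home
instance (targets : List Int) (home : Int) (out : List (List Int)) : Decidable (Spec_make_routes targets home out) := by unfold Spec_make_routes; infer_instance

-- ===== CLAIM (what is proved, stated in full; the proofs are below) =====
def Claim_equal_make_routes : Prop := ∀ (targets : List Int) (home : Int), Dom_make_routes targets home → Spec_make_routes targets home (make_routes targets home)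

-- ===== LEMMAS AND PROOFS =====

theorem perms_ne_nil_eq (xs : List Int) (h : xs ≠ []) :
    perms xs = (picks xs).flatMap (fun q => (perms q.2).map (q.1 :: ·)) := by
  rw [perms, if_neg h]
  conv_rhs => rw [← List.attach_map_subtype_val (l := picks xs)]
  rw [List.flatMap_map]

theorem bridge (F : Int → List Int → List (List Int)) :
    ∀ xs : List Int,
    (List.range xs.length).flatMap (fun i => F (xs.getD i 0) (xs.take i ++ xs.drop (i+1)))
      = (picks xs).flatMap (fun q => F q.1 q.2) := by
  intro xs
  induction xs generalizing F with
  | nil => simp [picks]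
  | cons x xs ih =>
    simp only [List.length_cons, List.range_succ_eq_map, List.flatMap_cons, List.flatMap_map]
    simp only [List.getD_cons_succ, List.take_succ_cons, List.drop_succ_cons, List.cons_append]
    rw [ih (fun a l => F a (x :: l))]
    simp [picks, List.flatMap_map]

theorem loop_eq (route targets : List Int) (home : Int) :
    ∀ (d i : Nat) (acc : List (List Int)), i + d = targets.length →
    make_routes_loop route targets home i acc
      = acc ++ (List.range' i d).flatMap (fun (j : Nat) =>
          make_routes_f (route ++ [PySem.List.pyGetD targets (j : Int) 0])
            (PySem.List.slice targets none (some (j : Int)) ++ PySem.List.slice targets (some ((j : Int)+1)) none) home) := by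
  intro d
  induction d with
  | zero =>
    intro i acc h
    rw [make_routes_loop.eq_def, if_neg (by omega)]
    simp
  | succ d ih =>
    intro i acc h
    rw [make_routes_loop.eq_def, if_pos (by omega)]
    rw [ih (i+1) _ (by omega)]
    simp [List.range'_succ]

theorem f_eq (n : Nat) : ∀ (targets : List Int), targets.length = n →
    ∀ (route : List Int) (home : Int), route ≠ [] →
    make_routes_f route targets home = (perms targets).map (fun p => route ++ p ++ [home]) := by
  induction n using Nat.strong_induction_on with
  | _ n ih =>
    intro targets hlen route home hr
    rw [make_routes_f.eq_def, if_neg hr]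
    by_cases ht : targets = []
    · subst ht; simp [perms]
    · rw [if_neg ht]
      rw [loop_eq route targets home targets.length 0 [] (by omega)]
      rw [List.nil_append, ← List.range_eq_range']
      have hstep : ∀ j : Nat, j < targets.length →
          make_routes_f (route ++ [PySem.List.pyGetD targets (j : Int) 0])
            (PySem.List.slice targets none (some (j : Int)) ++ PySem.List.slice targets (some ((j : Int)+1)) none) home
          = (perms (targets.take j ++ targets.drop (j+1))).map
              (fun p => route ++ (targets.getD j 0 :: p) ++ [home]) := by
        intro j hj
        rw [PySem.List.pyGetD_natCast, PySem.List.slice_to_natCast]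
        have hc : ((j : Int) + 1) = ((j + 1 : Nat) : Int) := by push_cast; ring
        rw [hc, PySem.List.slice_from_natCast]
        have hlt : (targets.take j ++ targets.drop (j+1)).length < n := by
          simp; omega
        rw [ih _ hlt _ rfl _ home (by simp)]
        apply List.map_congr_left
        intro p _
        simp
      rw [List.flatMap_congr (fun j hj => hstep j (by simpa using List.mem_range.mp hj))]
      rw [bridge (fun a l => (perms l).map (fun p => route ++ (a :: p) ++ [home])) targets]
      rw [perms_ne_nil_eq targets ht, List.map_flatMap]
      apply List.flatMap_congr
      intro q hq
      simp

-- ===== VERDICT (by name: the statement is the Claim_ definition above) =====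
theorem make_routes_spec : Claim_equal_make_routes := by
  intro targets home _
  unfold Spec_make_routes make_routes make_routes_alt
  rw [make_routes_f.eq_def, if_pos rfl]
  rw [f_eq targets.length targets rfl ([] ++ [home]) home (by simp)]
  simp
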